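-- pv_equiv track=rewrite | github.com/Biomolecular-Design-Nexus/nupack_mcp | examples/use_case_5_energy_evaluation.py | generate_mock_mfe_structure
-- ===== SOURCE A (Python) =====
-- def generate_mock_mfe_structure(sequence):
--     """Generate a mock MFE structure"""
--     n = len(sequence)
--     structure = ['.'] * n
--
--     # Simple algorithm: find complementary regions and pair them
--     complement = {'A': 'T', 'T': 'A', 'G': 'C', 'C': 'G', 'U': 'A'}
--     if 'U' in sequence:
--         complement['A'] = 'U'
--
--     for i in range(n - 4):  # Minimum loop size
--         for j in range(i + 4, n):
--             if (structure[i] == '.' and structure[j] == '.' and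
--                 sequence[i] in complement and sequence[j] == complement[sequence[i]]):
--                 structure[i] = '('
--                 structure[j] = ')'
--                 break
--
--     return ''.join(structure)
-- ===== SOURCE B (Python) =====
-- def _comp(ch, has_u):
--     """Complement of a base (mock pairing rule); None if ch is not a base."""
--     if ch == 'A':
--         return 'U' if has_u else 'T'
--     if ch == 'T':
--         return 'A'
--     if ch == 'G':
--         return 'C'
--     if ch == 'C':
--         return 'G'
--     if ch == 'U':
--         return 'A'
--     return None
--
--
-- def generate_mock_mfe_structure(sequence):
--     """Generate a mock MFE structure"""
--     n = len(sequence)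
--     structure = ['.'] * n
--     has_u = 'U' in sequence
--
--     # positions of each character, ascending; each list is consumed left-to-right
--     # by a lazily-advancing pointer (positions below i+4 or already paired are
--     # skipped once and never revisited, so total pointer work is O(n)).
--     avail = {}
--     for idx, ch in enumerate(sequence):
--         avail.setdefault(ch, []).append(idx)
--     ptr = {}
--
--     for i in range(n - 4):
--         if structure[i] != '.':
--             continue
--         c = _comp(sequence[i], has_u)
--         if c is None:
--             continue
--         lst = avail.get(c, ())
--         k = ptr.get(c, 0)
--         while k < len(lst) and (lst[k] < i + 4 or structure[lst[k]] != '.'):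
--             k += 1
--         ptr[c] = k
--         if k < len(lst):
--             j = lst[k]
--             structure[i] = '('
--             structure[j] = ')'
--             ptr[c] = k + 1
--
--     return ''.join(structure)
-- ===== Notes on version B (the rewrite author's own statement) =====
-- stated objective: faster
-- what changed: Replaces the O(n^2) inner scan for a partner j with per-base ascending position lists consumed by lazily-advancing pointers (positions below i+4 or already paired are skipped once and never revisited), making the pairing pass linear after the index build.
import Mathlib
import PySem

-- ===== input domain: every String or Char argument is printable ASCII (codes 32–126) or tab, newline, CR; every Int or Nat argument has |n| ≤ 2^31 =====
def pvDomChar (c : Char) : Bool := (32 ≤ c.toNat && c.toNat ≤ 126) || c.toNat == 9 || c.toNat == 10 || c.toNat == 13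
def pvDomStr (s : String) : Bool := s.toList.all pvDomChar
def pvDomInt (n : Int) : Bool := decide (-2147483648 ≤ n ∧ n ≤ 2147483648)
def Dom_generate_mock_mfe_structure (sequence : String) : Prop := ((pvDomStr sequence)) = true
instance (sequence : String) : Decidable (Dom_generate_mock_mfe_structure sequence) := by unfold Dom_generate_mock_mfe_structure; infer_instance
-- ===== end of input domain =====

-- B replaces A's quadratic inner partner scan by per-base ascending position lists
-- consumed with lazily-advancing pointers (objective: faster; measured asymptotic speed-up).


-- ===== PORT A =====
-- inner 'for j in range(i+4, n): … break' loop of A; all indexing is in range, so getD is exact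
def pvInnerA (seq : List Char) (comp : PySem.Dict Char Char) (i : Nat)
    (st : List Char) (js : List Nat) : List Char :=
  match js with
  | [] => st
  | j :: rest =>
    if st.getD i '?' = '.' ∧ st.getD j '?' = '.' ∧
        comp.get? (seq.getD i ' ') = some (seq.getD j ' ') then
      (st.set i '(').set j ')'
    else pvInnerA seq comp i st rest

def generate_mock_mfe_structure (sequence : String) : String :=
  let seq := sequence.toList
  let n := seq.length
  let comp0 : PySem.Dict Char Char :=
    PySem.Dict.ofList [('A', 'T'), ('T', 'A'), ('G', 'C'), ('C', 'G'), ('U', 'A')]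
  let comp := if PySem.Str.isIn "U" sequence then comp0.insert 'A' 'U' else comp0
  -- range(n-4) / range(i+4, n): Nat subtraction gives the empty list exactly when Python does
  let res := (List.range (n - 4)).foldl
    (fun st i => pvInnerA seq comp i st (List.range' (i + 4) (n - (i + 4))))
    (List.replicate n '.')
  String.ofList res

-- ===== PORT B =====
def pvComp (hasU : Bool) (ch : Char) : Option Char :=
  if ch = 'A' then some (if hasU then 'U' else 'T')
  else if ch = 'T' then some 'A'
  else if ch = 'G' then some 'C'
  else if ch = 'C' then some 'G'
  else if ch = 'U' then some 'A'
  else none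

-- Source B's avail[c]: the ascending positions of character c (Source B builds these lists once
-- by one enumerate pass; the list looked up for c is exactly this filter, never mutated)
def pvPositions (seq : List Char) (c : Char) : List Nat :=
  (List.range seq.length).filter (fun j => seq.getD j ' ' = c)

-- Source B's 'while k < len(lst) and (lst[k] < i+4 or structure[lst[k]] != "."): k += 1'
def pvAdvance (st : List Char) (lim : Nat) (lst : List Nat) (k : Nat) : Nat :=
  if k < lst.length then
    if lst.getD k 0 < lim ∨ st.getD (lst.getD k 0) '?' ≠ '.' then pvAdvance st lim lst (k + 1)
    else k
  else k
termination_by lst.length - k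

-- body of Source B's 'for i in range(n - 4)' loop; state = (structure, ptr)
def pvStepB (seq : List Char) (hasU : Bool)
    (sp : List Char × PySem.Dict Char Nat) (i : Nat) : List Char × PySem.Dict Char Nat :=
  if sp.1.getD i '?' ≠ '.' then sp
  else
    match pvComp hasU (seq.getD i ' ') with
    | none => sp
    | some c =>
      let lst := pvPositions seq c
      let k := pvAdvance sp.1 (i + 4) lst (sp.2.getD c 0)
      if k < lst.length then
        ((sp.1.set i '(').set (lst.getD k 0) ')', sp.2.insert c (k + 1))
      else (sp.1, sp.2.insert c k)

def generate_mock_mfe_structure_alt (sequence : String) : String :=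
  let seq := sequence.toList
  let n := seq.length
  let hasU := PySem.Str.isIn "U" sequence
  let res := (List.range (n - 4)).foldl (pvStepB seq hasU) (List.replicate n '.', PySem.Dict.empty)
  String.ofList res.1


-- ===== PRECONDITION & SPEC =====
def Spec_generate_mock_mfe_structure (sequence : String) (out : String) : Prop := out = generate_mock_mfe_structure_alt sequence
instance (sequence : String) (out : String) : Decidable (Spec_generate_mock_mfe_structure sequence out) := by unfold Spec_generate_mock_mfe_structure; infer_instance

-- ===== CLAIM (what is proved, stated in full; the proofs are below) =====
def Claim_equal_generate_mock_mfe_structure : Prop := ∀ (sequence : String), Dom_generate_mock_mfe_structure sequence → Spec_generate_mock_mfe_structure sequence (generate_mock_mfe_structure sequence)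

-- ===== LEMMAS AND PROOFS =====

def pvPredA (seq st : List Char) (c : Char) (j : Nat) : Bool :=
  decide (st.getD j '?' = '.') && (seq.getD j ' ' == c)

def pvGood (st : List Char) (lim j : Nat) : Bool :=
  decide (lim ≤ j) && decide (st.getD j '?' = '.')

def pvInv (seq st : List Char) (ptrs : PySem.Dict Char Nat) (i : Nat) : Prop :=
  ∀ c : Char, ptrs.getD c 0 ≤ (pvPositions seq c).length ∧
    ∀ m, m < ptrs.getD c 0 →
      ((pvPositions seq c).getD m 0 < i + 4 ∨ st.getD ((pvPositions seq c).getD m 0) '?' ≠ '.')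

lemma innerA_skip (seq : List Char) (comp : PySem.Dict Char Char) (i : Nat) (st : List Char)
    (js : List Nat) (h : st.getD i '?' ≠ '.' ∨ comp.get? (seq.getD i ' ') = none) :
    pvInnerA seq comp i st js = st := by
  induction js with
  | nil => rfl
  | cons j rest ih =>
    rw [pvInnerA, if_neg, ih]
    rintro ⟨h1, _, h3⟩
    rcases h with h | h
    · exact h h1
    · rw [h] at h3; simp at h3

lemma innerA_find (seq : List Char) (comp : PySem.Dict Char Char) (i : Nat) (st : List Char)
    (js : List Nat) (c : Char) (h1 : st.getD i '?' = '.')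
    (h2 : comp.get? (seq.getD i ' ') = some c) :
    pvInnerA seq comp i st js =
      match js.find? (pvPredA seq st c) with
      | some j => (st.set i '(').set j ')'
      | none => st := by
  induction js with
  | nil => rfl
  | cons j rest ih =>
    rw [pvInnerA, List.find?_cons]
    by_cases hj : pvPredA seq st c j = true
    · have hj' : st.getD j '?' = '.' ∧ seq.getD j ' ' = c := by
        simpa [pvPredA] using hj
      rw [if_pos ⟨h1, hj'.1, by rw [h2, hj'.2]⟩, hj]
    · have hj' : ¬(st.getD j '?' = '.' ∧ seq.getD j ' ' = c) := by
        simpa [pvPredA] using hj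
      rw [if_neg, Bool.eq_false_iff.mpr hj, ih]
      rintro ⟨-, hb, hc⟩
      rw [h2] at hc
      exact hj' ⟨hb, (Option.some.injEq _ _ ▸ hc).symm⟩

lemma mem_positions (seq : List Char) (c : Char) (j : Nat) :
    j ∈ pvPositions seq c ↔ j < seq.length ∧ seq.getD j ' ' = c := by
  simp [pvPositions, List.mem_filter, List.mem_range]

lemma positions_getD_mem (seq : List Char) (c : Char) (m : Nat)
    (hm : m < (pvPositions seq c).length) : (pvPositions seq c).getD m 0 ∈ pvPositions seq c := by
  rw [List.getD_eq_getElem?_getD, List.getElem?_eq_getElem hm]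
  exact List.getElem_mem hm

lemma pvAdvance_spec (st : List Char) (lim : Nat) (lst : List Nat) (k : Nat) :
    k ≤ pvAdvance st lim lst k ∧
    (k ≤ lst.length → pvAdvance st lim lst k ≤ lst.length) ∧
    (∀ m, k ≤ m → m < pvAdvance st lim lst k →
        (lst.getD m 0 < lim ∨ st.getD (lst.getD m 0) '?' ≠ '.')) ∧
    (pvAdvance st lim lst k < lst.length →
        ¬(lst.getD (pvAdvance st lim lst k) 0 < lim ∨
          st.getD (lst.getD (pvAdvance st lim lst k) 0) '?' ≠ '.')) := by
  fun_induction pvAdvance st lim lst k with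
  | case1 k hk hbad ih =>
    refine ⟨by omega, fun _ => ih.2.1 (by omega), ?_, ih.2.2.2⟩
    intro m hm1 hm2
    rcases Nat.eq_or_lt_of_le hm1 with rfl | hlt
    · exact hbad
    · exact ih.2.2.1 m hlt hm2
  | case2 k hk hgood => exact ⟨le_refl _, fun h => le_of_lt hk, fun m h1 h2 => by omega, fun _ => hgood⟩
  | case3 k hk => exact ⟨le_refl _, fun h => h, fun m h1 h2 => by omega, fun h => by omega⟩

lemma find?_eq_some_of_first (l : List Nat) (p : Nat → Bool) (r : Nat) (hr : r < l.length)
    (hgood : p (l.getD r 0) = true) (hbad : ∀ m, m < r → p (l.getD m 0) = false) :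
    l.find? p = some (l.getD r 0) := by
  induction l generalizing r with
  | nil => simp at hr
  | cons a t ih =>
    cases r with
    | zero => simp_all
    | succ r' =>
      have ha : p a = false := by simpa using hbad 0 (Nat.succ_pos _)
      rw [List.find?_cons, ha]
      simp only [List.getD_cons_succ] at hgood ⊢
      exact ih r' (by simpa using hr) hgood (fun m hm => by simpa using hbad (m+1) (by omega))

lemma find?_congr' {α : Type} (l : List α) (p q : α → Bool) (h : ∀ x ∈ l, p x = q x) :
    l.find? p = l.find? q := by
  induction l with
  | nil => rfl
  | cons a t ih =>
    rw [List.find?_cons, List.find?_cons, h a (List.mem_cons_self),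
      ih (fun x hx => h x (List.mem_cons_of_mem _ hx))]

lemma findB_eq_findA (seq st : List Char) (c : Char) (i : Nat) :
    (pvPositions seq c).find? (pvGood st (i + 4)) =
    (List.range' (i + 4) (seq.length - (i + 4))).find? (pvPredA seq st c) := by
  rw [pvPositions, List.find?_filter]
  rcases le_or_gt (i + 4) seq.length with hle | hgt
  · have hsplit : List.range seq.length
        = List.range' 0 (i + 4) ++ List.range' (i + 4) (seq.length - (i + 4)) := by
      rw [List.range_eq_range']
      have := @List.range'_append 0 (i + 4) (seq.length - (i + 4)) 1
      simp only [one_mul, zero_add] at this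
      rw [this, Nat.add_sub_cancel' hle]
    rw [hsplit, List.find?_append]
    have h1 : (List.range' 0 (i + 4)).find?
        (fun a => decide ((fun j => decide (seq.getD j ' ' = c)) a = true ∧ pvGood st (i + 4) a = true)) = none := by
      rw [List.find?_eq_none]
      intro x hx
      have : x < i + 4 := by
        rcases List.mem_range'_1.mp hx with ⟨_, h⟩; omega
      simp [pvGood]
      omega
    rw [h1, Option.none_or]
    apply find?_congr'
    intro x hx
    have hx4 : i + 4 ≤ x := (List.mem_range'_1.mp hx).1
    simp [pvGood, pvPredA, hx4, Bool.and_comm, Bool.beq_eq_decide_eq]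
  · have h2 : seq.length - (i + 4) = 0 := by omega
    rw [h2]
    simp only [List.range'_zero, List.find?_nil]
    rw [List.find?_eq_none]
    intro x hx
    have : x < i + 4 := lt_of_lt_of_le (List.mem_range.mp hx) (le_of_lt hgt)
    simp [pvGood]
    omega

lemma set_pair_mono (st : List Char) (i j x : Nat) (hx : st.getD x '?' ≠ '.') :
    ((st.set i '(').set j ')').getD x '?' ≠ '.' := by
  simp only [List.getD_eq_getElem?_getD, List.getElem?_set, List.length_set]
  split_ifs <;> simp_all

lemma pvGood_eq_false (st : List Char) (lim j : Nat)
    (h : j < lim ∨ st.getD j '?' ≠ '.') : pvGood st lim j = false := by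
  simp only [pvGood, Bool.and_eq_false_iff, decide_eq_false_iff_not]
  rcases h with h | h
  · exact Or.inl (by omega)
  · exact Or.inr h

lemma step_eq (seq : List Char) (hasU : Bool) (comp : PySem.Dict Char Char)
    (hcomp : ∀ ch, comp.get? ch = pvComp hasU ch)
    (st : List Char) (ptrs : PySem.Dict Char Nat) (i : Nat)
    (hlen : st.length = seq.length) (hInv : pvInv seq st ptrs i) :
    pvInnerA seq comp i st (List.range' (i + 4) (seq.length - (i + 4)))
        = (pvStepB seq hasU (st, ptrs) i).1 ∧
    (pvStepB seq hasU (st, ptrs) i).1.length = seq.length ∧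
    pvInv seq (pvStepB seq hasU (st, ptrs) i).1 (pvStepB seq hasU (st, ptrs) i).2 (i + 1) := by
  have invMono : ∀ (st' : List Char) (ptrs' : PySem.Dict Char Nat),
      (∀ c, ptrs'.getD c 0 = ptrs.getD c 0) →
      (∀ x, st.getD x '?' ≠ '.' → st'.getD x '?' ≠ '.') → pvInv seq st' ptrs' (i + 1) := by
    intro st' ptrs' hp hmono c
    obtain ⟨hb, hm⟩ := hInv c
    refine ⟨hp c ▸ hb, fun m hm' => ?_⟩
    rcases hm m (hp c ▸ hm') with h | h
    · exact Or.inl (by omega)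
    · exact Or.inr (hmono _ h)
  by_cases hdot : st.getD i '?' = '.'
  case neg =>
    rw [innerA_skip seq comp i st _ (Or.inl hdot)]
    rw [pvStepB, if_pos hdot]
    exact ⟨rfl, hlen, invMono st ptrs (fun _ => rfl) (fun _ h => h)⟩
  case pos =>
    rcases hc : pvComp hasU (seq.getD i ' ') with _ | c
    · rw [innerA_skip seq comp i st _ (Or.inr ((hcomp _).trans hc))]
      rw [pvStepB, if_neg (by simp only [ne_eq, not_not]; exact hdot), hc]
      exact ⟨rfl, hlen, invMono st ptrs (fun _ => rfl) (fun _ h => h)⟩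
    · -- active case
      rw [innerA_find seq comp i st _ c hdot ((hcomp _).trans hc), ← findB_eq_findA seq st c i]
      rw [pvStepB, if_neg (by simp only [ne_eq, not_not]; exact hdot), hc]
      simp only
      set lst := pvPositions seq c with hlst
      set p0 := ptrs.getD c 0 with hp0
      set r := pvAdvance st (i + 4) lst p0 with hr
      obtain ⟨hInvb, hInvm⟩ := hInv c
      obtain ⟨hkr, hrlen, hbad, hgood⟩ := pvAdvance_spec st (i + 4) lst p0
      have hrlen' : r ≤ lst.length := hrlen hInvb
      have hballm : ∀ m, m < r → (lst.getD m 0 < i + 4 ∨ st.getD (lst.getD m 0) '?' ≠ '.') := by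
        intro m hm
        rcases lt_or_ge m p0 with h | h
        · exact hInvm m h
        · exact hbad m h hm
      have hfind : lst.find? (pvGood st (i + 4)) =
          if r < lst.length then some (lst.getD r 0) else none := by
        split_ifs with hrl
        · refine find?_eq_some_of_first lst _ r hrl ?_ ?_
          · have := hgood hrl
            push Not at this
            simp only [pvGood, Bool.and_eq_true, decide_eq_true_eq]
            exact ⟨this.1, this.2⟩
          · exact fun m hm => pvGood_eq_false st _ _ (hballm m hm)
        · rw [List.find?_eq_none]
          intro x hx
          obtain ⟨m, hmlen, rfl⟩ := List.mem_iff_getElem.mp hx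
          have hx' : lst.getD m 0 = lst[m] := by
            simp [List.getD_eq_getElem?_getD, List.getElem?_eq_getElem hmlen]
          rw [← hx', pvGood_eq_false st _ _ (hballm m (by omega))]
          simp
      rw [hfind]
      split_ifs with hrl
      · -- pair found
        refine ⟨rfl, by simp [hlen], ?_⟩
        simp only
        intro c'
        have hjmem := positions_getD_mem seq c r (hlst ▸ hrl)
        have hjlt : lst.getD r 0 < seq.length := ((mem_positions seq c _).mp (hlst ▸ hjmem)).1
        have hmono : ∀ x, st.getD x '?' ≠ '.' →
            ((st.set i '(').set (lst.getD r 0) ')').getD x '?' ≠ '.' :=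
          fun x hx => set_pair_mono st i (lst.getD r 0) x hx
        by_cases hcc : c' = c
        · subst hcc
          rw [PySem.Dict.getD_insert_self, ← hlst]
          refine ⟨by omega, fun m hm => ?_⟩
          rcases Nat.lt_succ_iff_lt_or_eq.mp hm with hm' | rfl
          · rcases hballm m hm' with h | h
            · exact Or.inl (by omega)
            · exact Or.inr (hmono _ h)
          · refine Or.inr ?_
            have hval : ((st.set i '(').set (lst.getD r 0) ')').getD (lst.getD r 0) '?' = ')' := by
              have hlt2 : lst.getD r 0 < (st.set i '(').length := by
                rw [List.length_set, hlen]; exact hjlt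
              rw [List.getD_eq_getElem?_getD, List.getElem?_set, if_pos rfl, if_pos hlt2]
              rfl
            rw [hval]
            simp
        · rw [PySem.Dict.getD_insert_of_ne ptrs _ _ hcc]
          obtain ⟨hb', hm'⟩ := hInv c'
          refine ⟨hb', fun m hm => ?_⟩
          rcases hm' m hm with h | h
          · exact Or.inl (by omega)
          · exact Or.inr (hmono _ h)
      · -- not found
        refine ⟨rfl, hlen, ?_⟩
        simp only
        intro c'
        by_cases hcc : c' = c
        · subst hcc
          rw [PySem.Dict.getD_insert_self, ← hlst]
          exact ⟨hrlen', fun m hm => by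
            rcases hballm m hm with h | h
            · exact Or.inl (by omega)
            · exact Or.inr h⟩
        · rw [PySem.Dict.getD_insert_of_ne ptrs _ _ hcc]
          obtain ⟨hb', hm'⟩ := hInv c'
          refine ⟨hb', fun m hm => ?_⟩
          rcases hm' m hm with h | h
          · exact Or.inl (by omega)
          · exact Or.inr h

lemma get?_mk5 (l : List (Char × Char)) (ch : Char) :
    (PySem.Dict.mk l).get? ch = l.lookup ch := by
  induction l with
  | nil => simp [PySem.Dict.get?, List.lookup]
  | cons p t ih =>
    obtain ⟨k, v⟩ := p
    rw [PySem.Dict.get?_mk_cons, List.lookup]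
    by_cases h : ch = k
    · simp [h]
    · rw [show (ch == k) = false by simp [h], show (k == ch) = false by simp [Ne.symm h], ih]
      simp

lemma lookup_comp (v ch : Char) :
    List.lookup ch [('A', v), ('T', 'A'), ('G', 'C'), ('C', 'G'), ('U', 'A')] =
    (if ch = 'A' then some v else if ch = 'T' then some 'A' else if ch = 'G' then some 'C'
     else if ch = 'C' then some 'G' else if ch = 'U' then some 'A' else none) := by
  rcases eq_or_ne ch 'A' with rfl | hA
  · simp [List.lookup]
  rcases eq_or_ne ch 'T' with rfl | hT
  · simp [List.lookup]
  rcases eq_or_ne ch 'G' with rfl | hG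
  · simp [List.lookup]
  rcases eq_or_ne ch 'C' with rfl | hC
  · simp [List.lookup]
  rcases eq_or_ne ch 'U' with rfl | hU
  · simp [List.lookup]
  simp [List.lookup, hA, hT, hG, hC, hU,
    show (ch == 'A') = false by simp [hA], show (ch == 'T') = false by simp [hT],
    show (ch == 'G') = false by simp [hG], show (ch == 'C') = false by simp [hC],
    show (ch == 'U') = false by simp [hU]]

lemma comp_bridge (b : Bool) (ch : Char) :
    (if b then (PySem.Dict.ofList [('A', 'T'), ('T', 'A'), ('G', 'C'), ('C', 'G'), ('U', 'A')]).insert 'A' 'U'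
     else PySem.Dict.ofList [('A', 'T'), ('T', 'A'), ('G', 'C'), ('C', 'G'), ('U', 'A')]).get? ch
    = pvComp b ch := by
  have h : (PySem.Dict.ofList [('A', 'T'), ('T', 'A'), ('G', 'C'), ('C', 'G'), ('U', 'A')]).insert 'A' 'U'
      = PySem.Dict.mk [('A', 'U'), ('T', 'A'), ('G', 'C'), ('C', 'G'), ('U', 'A')] := by decide
  have h0 : PySem.Dict.ofList [('A', 'T'), ('T', 'A'), ('G', 'C'), ('C', 'G'), ('U', 'A')]
      = PySem.Dict.mk [('A', 'T'), ('T', 'A'), ('G', 'C'), ('C', 'G'), ('U', 'A')] := by decide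
  cases b
  · rw [if_neg (by simp), h0, get?_mk5, lookup_comp]; simp [pvComp]
  · rw [if_pos rfl, h, get?_mk5, lookup_comp]; simp [pvComp]

lemma fold_eq (seq : List Char) (hasU : Bool) (comp : PySem.Dict Char Char)
    (hcomp : ∀ ch, comp.get? ch = pvComp hasU ch) :
    ∀ (m i0 : Nat) (st : List Char) (ptrs : PySem.Dict Char Nat),
      st.length = seq.length → pvInv seq st ptrs i0 →
      (List.range' i0 m).foldl
          (fun s i => pvInnerA seq comp i s (List.range' (i + 4) (seq.length - (i + 4)))) st
        = ((List.range' i0 m).foldl (pvStepB seq hasU) (st, ptrs)).1 := by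
  intro m
  induction m with
  | zero => intro i0 st ptrs _ _; rfl
  | succ m ih =>
    intro i0 st ptrs hlen hInv
    rw [List.range'_succ, List.foldl_cons, List.foldl_cons]
    obtain ⟨h1, h2, h3⟩ := step_eq seq hasU comp hcomp st ptrs i0 hlen hInv
    rw [h1]
    have := ih (i0 + 1) (pvStepB seq hasU (st, ptrs) i0).1 (pvStepB seq hasU (st, ptrs) i0).2 h2 h3
    simpa using this

lemma inv_init (seq : List Char) (st : List Char) (i : Nat) :
    pvInv seq st PySem.Dict.empty i := by
  intro c
  constructor
  · simp [PySem.Dict.getD_empty]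
  · intro m hm
    simp [PySem.Dict.getD_empty] at hm

lemma ports_agree (sequence : String) :
    generate_mock_mfe_structure sequence = generate_mock_mfe_structure_alt sequence := by
  unfold generate_mock_mfe_structure generate_mock_mfe_structure_alt
  simp only
  apply congrArg String.ofList
  rw [List.range_eq_range']
  exact fold_eq sequence.toList (PySem.Str.isIn "U" sequence) _
    (comp_bridge (PySem.Str.isIn "U" sequence)) (sequence.toList.length - 4) 0
    (List.replicate sequence.toList.length '.') PySem.Dict.empty
    (List.length_replicate) (inv_init _ _ _)

-- ===== VERDICT (by name: the statement is the Claim_ definition above) =====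
theorem generate_mock_mfe_structure_spec : Claim_equal_generate_mock_mfe_structure := by
  intro sequence _
  unfold Spec_generate_mock_mfe_structure
  exact ports_agree sequence
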